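-- pv_equiv track=rewrite | github.com/baesh3744/algorithm-solutions | baekjoon/10000/10875.py | list_turning_points
-- ===== SOURCE A (Python) =====
-- MOVE_LIST = [(0, 1), (-1, 0), (0, -1), (1, 0)]
--
-- Point = tuple[int, int]
--
-- def list_turning_points(
--     l: int, n: int, move_inputs: list[tuple[int, str]]
-- ) -> list[Point]:
--     head: int = 0
--     turning_points: list[Point] = [(l, l) for _ in range(n + 2)]
--     for idx, (t, dir) in enumerate(move_inputs, 1):
--         last_y, last_x = turning_points[idx - 1]
--         move_y, move_x = MOVE_LIST[head]
--         turning_points[idx] = (last_y + move_y * t, last_x + move_x * t)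
--         head = (head + (1 if dir == "L" else -1) + 4) % 4
--     return turning_points
-- ===== SOURCE B (Python) =====
-- MOVE_LIST = [(0, 1), (-1, 0), (0, -1), (1, 0)]
--
--
-- def list_turning_points(l, n, move_inputs):
--     # pass 1: cumulative turns -> heading in effect before each move
--     headings = [0]
--     for _, dir in move_inputs:
--         headings.append((headings[-1] + (1 if dir == "L" else 3)) % 4)
--     # pass 2: prefix-sum of displacement vectors, seeded at (l, l)
--     points = [(l, l)]
--     for (t, _), h in zip(move_inputs, headings):
--         my, mx = MOVE_LIST[h]
--         y, x = points[-1]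
--         points.append((y + my * t, x + mx * t))
--     # normalize to length n + 2, padding with (l, l)
--     points = points[: n + 2]
--     return points + [(l, l)] * (n + 2 - len(points))
-- ===== Notes on version B (the rewrite author's own statement) =====
-- stated objective: alternative
-- what changed: A fills a fixed array and mutates it in place while threading the heading through the same loop; B is two separate passes (a cumulative-turn pass computing the heading before each move, then a prefix-sum pass over displacement vectors) followed by slice-and-pad to length n+2.
import Mathlib
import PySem

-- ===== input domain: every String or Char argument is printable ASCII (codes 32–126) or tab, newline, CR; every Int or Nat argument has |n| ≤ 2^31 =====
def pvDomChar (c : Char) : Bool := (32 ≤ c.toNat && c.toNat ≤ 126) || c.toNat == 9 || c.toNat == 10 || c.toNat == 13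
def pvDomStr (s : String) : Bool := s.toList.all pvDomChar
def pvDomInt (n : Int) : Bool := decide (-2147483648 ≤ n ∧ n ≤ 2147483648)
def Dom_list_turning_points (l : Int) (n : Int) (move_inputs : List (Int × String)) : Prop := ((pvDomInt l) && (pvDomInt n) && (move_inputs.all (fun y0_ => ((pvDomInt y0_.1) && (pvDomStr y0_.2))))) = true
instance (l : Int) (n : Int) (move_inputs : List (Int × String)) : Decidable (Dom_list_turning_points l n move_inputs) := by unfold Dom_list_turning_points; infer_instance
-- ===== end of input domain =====

-- B replaces A's single in-place array-mutation loop by two passes (cumulative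
-- turns, then a prefix sum of displacement vectors) plus slice-and-pad: an
-- alternative decomposition of the same cost.

-- ===== PORT A =====
def MOVE_LIST : List (Int × Int) := [(0, 1), (-1, 0), (0, -1), (1, 0)]

-- the for-loop of A, carrying (idx, head, turning_points)
def pvALoop : Nat → Int → List (Int × Int) → List (Int × String) → List (Int × Int)
  | _, _, tp, [] => tp
  | idx, head, tp, (t, dir) :: rest =>
    let last := tp.getD (idx - 1) (0, 0)      -- turning_points[idx - 1]; in range under Pre_
    let mv := MOVE_LIST.getD head.toNat (0, 0)  -- MOVE_LIST[head]; head ∈ {0,1,2,3} always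
    pvALoop (idx + 1) (PySem.Int.mod (head + (if dir == "L" then 1 else -1) + 4) 4)
      (tp.set idx (last.1 + mv.1 * t, last.2 + mv.2 * t)) rest

def list_turning_points (l : Int) (n : Int) (move_inputs : List (Int × String)) : List (Int × Int) :=
  pvALoop 1 0 (List.replicate (n + 2).toNat (l, l)) move_inputs

-- ===== PORT B =====
-- pass 1 of Source B: headings after the seed 0, each step appending (last + turn) % 4
def pvHeads (h : Int) : List (Int × String) → List Int
  | [] => []
  | (_, d) :: rest =>
    let h' := PySem.Int.mod (h + (if d == "L" then 1 else 3)) 4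
    h' :: pvHeads h' rest

-- pass 2 of Source B: points after the seed (l, l), each step appending last + MOVE_LIST[h] * t
def pvAccum (p : Int × Int) : List ((Int × String) × Int) → List (Int × Int)
  | [] => []
  | ((t, _), h) :: rest =>
    let mv := MOVE_LIST.getD h.toNat (0, 0)
    let p' := (p.1 + mv.1 * t, p.2 + mv.2 * t)
    p' :: pvAccum p' rest

def list_turning_points_alt (l : Int) (n : Int) (move_inputs : List (Int × String)) : List (Int × Int) :=
  let headings : List Int := 0 :: pvHeads 0 move_inputs
  let points : List (Int × Int) := (l, l) :: pvAccum (l, l) (move_inputs.zip headings)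
  let pts := PySem.List.slice points none (some (n + 2))          -- points[: n + 2]
  pts ++ List.replicate (n + 2 - (pts.length : Int)).toNat (l, l)  -- + [(l, l)] * (n + 2 - len)

-- ===== PRECONDITION & SPEC =====
-- Pre_ excludes exactly the inputs on which A raises IndexError (a nonempty
-- move list longer than its preallocated array allows).
def Pre_list_turning_points (l : Int) (n : Int) (move_inputs : List (Int × String)) : Prop :=
  move_inputs = [] ∨ (move_inputs.length : Int) ≤ n + 1
instance (l : Int) (n : Int) (move_inputs : List (Int × String)) : Decidable (Pre_list_turning_points l n move_inputs) := by unfold Pre_list_turning_points; infer_instance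

def pvWitness_list_turning_points : Int × Int × (List (Int × String)) := (3, 2, [(1, "L"), (2, "R")])

def Spec_list_turning_points (l : Int) (n : Int) (move_inputs : List (Int × String)) (out : List (Int × Int)) : Prop := out = list_turning_points_alt l n move_inputs
instance (l : Int) (n : Int) (move_inputs : List (Int × String)) (out : List (Int × Int)) : Decidable (Spec_list_turning_points l n move_inputs out) := by unfold Spec_list_turning_points; infer_instance

-- ===== CLAIM (what is proved, stated in full; the proofs are below) =====
def Claim_equal_list_turning_points : Prop := ∀ (l : Int) (n : Int) (move_inputs : List (Int × String)), Dom_list_turning_points l n move_inputs → Pre_list_turning_points l n move_inputs → Spec_list_turning_points l n move_inputs (list_turning_points l n move_inputs)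

-- ===== LEMMAS AND PROOFS =====

-- the common reference path: successive positions, heading threaded through
def pvPath (p : Int × Int) (h : Int) : List (Int × String) → List (Int × Int)
  | [] => []
  | (t, d) :: rest =>
    let mv := MOVE_LIST.getD h.toNat (0, 0)
    let p' := (p.1 + mv.1 * t, p.2 + mv.2 * t)
    p' :: pvPath p' (PySem.Int.mod (h + (if d == "L" then 1 else 3)) 4) rest

theorem pvTurn_eq (h : Int) (d : String) :
    PySem.Int.mod (h + (if d == "L" then 1 else -1) + 4) 4
      = PySem.Int.mod (h + (if d == "L" then 1 else 3)) 4 := by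
  rw [PySem.Int.mod_eq_emod_of_pos (by norm_num), PySem.Int.mod_eq_emod_of_pos (by norm_num)]
  split <;> omega

theorem pvPath_length (p : Int × Int) (h : Int) (ms : List (Int × String)) :
    (pvPath p h ms).length = ms.length := by
  induction ms generalizing p h with
  | nil => rfl
  | cons x rest ih => obtain ⟨t, d⟩ := x; simp [pvPath, ih]

theorem pvAccum_eq_path (ms : List (Int × String)) (p : Int × Int) (h : Int) :
    pvAccum p (ms.zip (h :: pvHeads h ms)) = pvPath p h ms := by
  induction ms generalizing p h with
  | nil => rfl
  | cons x rest ih =>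
    obtain ⟨t, d⟩ := x
    simp only [pvHeads, List.zip_cons_cons, pvAccum, pvPath]
    exact congrArg _ (ih _ _)

theorem pvGetD_append (xs : List (Int × Int)) (y : Int × Int) (zs : List (Int × Int)) (d : Int × Int) :
    (xs ++ y :: zs).getD xs.length d = y := by
  simp [List.getD]

theorem pvALoop_eq (ms : List (Int × String)) (pre : List (Int × Int)) (p : Int × Int)
    (suf : List (Int × Int)) (h : Int) (hlen : ms.length ≤ suf.length) :
    pvALoop (pre.length + 1) h (pre ++ p :: suf) ms
      = pre ++ p :: (pvPath p h ms ++ suf.drop ms.length) := by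
  induction ms generalizing pre p suf h with
  | nil => simp [pvALoop, pvPath]
  | cons x rest ih =>
    obtain ⟨t, d⟩ := x
    obtain ⟨s0, suf'⟩ : ∃ s0 suf', suf = s0 :: suf' := by
      cases suf with
      | nil => simp at hlen
      | cons a b => exact ⟨a, b, rfl⟩
    obtain ⟨suf', rfl⟩ := suf'
    simp only [pvALoop, pvTurn_eq]
    rw [show pre.length + 1 - 1 = pre.length from rfl, pvGetD_append]
    have hset : (pre ++ p :: s0 :: suf').set (pre.length + 1)
        (p.1 + (MOVE_LIST.getD h.toNat (0, 0)).1 * t, p.2 + (MOVE_LIST.getD h.toNat (0, 0)).2 * t)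
        = (pre ++ [p]) ++ (p.1 + (MOVE_LIST.getD h.toNat (0, 0)).1 * t, p.2 + (MOVE_LIST.getD h.toNat (0, 0)).2 * t) :: suf' := by
      simp
    rw [hset, show pre.length + 1 + 1 = (pre ++ [p]).length + 1 by simp]
    rw [ih _ _ _ _ (by simp at hlen ⊢; omega)]
    simp [pvPath]

theorem pvSlice_singleton_nonpos (x : Int × Int) (b : Int) (hb : b ≤ 0) :
    PySem.List.slice [x] none (some b) = [] := by
  rcases eq_or_lt_of_le hb with h0 | hneg
  · rw [h0, PySem.List.slice_to _ (le_refl 0)]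
    rfl
  · have hk : b = -((((-b).toNat : Nat)) : Int) := by omega
    rw [hk, PySem.List.slice_to_neg_natCast _ _ (by omega)]
    have : [x].length - (-b).toNat = 0 := by simp; omega
    rw [this, List.take_zero]

theorem list_turning_points_spec : Claim_equal_list_turning_points := by
  intro l n ms _ hpre
  unfold Spec_list_turning_points list_turning_points list_turning_points_alt
  dsimp only
  by_cases hm : (ms.length : Int) ≤ n + 1
  · -- the preallocated list is long enough
    have hN : (n + 2).toNat = 1 + ms.length + ((n + 2).toNat - (1 + ms.length)) := by omega
    have hrep : List.replicate (n + 2).toNat (l, l)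
        = ([] : List (Int × Int)) ++ (l, l) :: List.replicate ((n + 2).toNat - 1) (l, l) := by
      rw [List.nil_append, ← List.replicate_succ]
      congr 1
      omega
    rw [hrep, show (1 : Nat) = ([] : List (Int × Int)).length + 1 from rfl,
      pvALoop_eq _ _ _ _ _ (by simp; omega)]
    rw [List.nil_append, List.drop_replicate, pvAccum_eq_path]
    have hlen : ((l, l) :: pvPath (l, l) 0 ms).length = 1 + ms.length := by
      simp [pvPath_length]
      omega
    have hslice : PySem.List.slice ((l, l) :: pvPath (l, l) 0 ms) none (some (n + 2))
        = (l, l) :: pvPath (l, l) 0 ms := by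
      rw [PySem.List.slice_to _ (by omega)]
      exact List.take_of_length_le (by rw [hlen]; omega)
    rw [hslice, hlen]
    have hpad : (n + 2 - ((1 + ms.length : Nat) : Int)).toNat = (n + 2).toNat - 1 - ms.length := by
      omega
    rw [hpad]
    simp [Nat.sub_sub]
  · -- move_inputs is empty and n + 2 ≤ 0: both sides are []
    have hms : ms = [] := by
      rcases hpre with h | h
      · exact h
      · omega
    subst hms
    have hb : n + 2 ≤ 0 := by simp at hm; omega
    have h0 : (n + 2).toNat = 0 := by omega
    rw [h0]
    simp only [List.replicate_zero, List.zip_nil_left, pvAccum, pvALoop]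
    rw [pvSlice_singleton_nonpos _ _ hb]
    simp
    omega
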